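-- pv_equiv track=rewrite | github.com/rkhullar/multilang-code-scratches | src/main/python/problems/msdocs/stocks.py | rising_or_falling
-- ===== SOURCE A (Python) =====
-- def rising_or_falling(prices:[]):
--     greater_count = 1
--     less_count = 1
--
--     for i in range(len(prices)):
--         if prices[i] == prices[i-1]:
--             continue
--         if prices[i] > prices[i-1]:
--             less_count = 1
--             greater_count +=1
--         if prices[i] < prices[i-1]:
--             greater_count = 1
--             less_count +=1
--     return max([less_count,greater_count])
-- ===== SOURCE B (Python) =====
-- def rising_or_falling(prices):
--     # Backward early-exit scan: the answer is 1 + length of the trailing run of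
--     # same-direction comparisons (equal neighbours are transparent; the i=0
--     # comparison is circular, prices[0] vs prices[-1], as in the original).
--     direction = 0
--     run = 0
--     for i in range(len(prices) - 1, -1, -1):
--         a, b = prices[i], prices[i - 1]
--         if a == b:
--             continue
--         d = 1 if a > b else -1
--         if direction == 0:
--             direction = d
--             run = 1
--         elif d == direction:
--             run += 1
--         else:
--             break
--     return run + 1
-- ===== Notes on version B (the rewrite author's own statement) =====
-- stated objective: faster
-- what changed: Replaced A's full forward pass maintaining two counters with a backward scan from the end that counts the trailing run of same-direction comparisons and exits early at the first opposite comparison.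
import Mathlib
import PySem

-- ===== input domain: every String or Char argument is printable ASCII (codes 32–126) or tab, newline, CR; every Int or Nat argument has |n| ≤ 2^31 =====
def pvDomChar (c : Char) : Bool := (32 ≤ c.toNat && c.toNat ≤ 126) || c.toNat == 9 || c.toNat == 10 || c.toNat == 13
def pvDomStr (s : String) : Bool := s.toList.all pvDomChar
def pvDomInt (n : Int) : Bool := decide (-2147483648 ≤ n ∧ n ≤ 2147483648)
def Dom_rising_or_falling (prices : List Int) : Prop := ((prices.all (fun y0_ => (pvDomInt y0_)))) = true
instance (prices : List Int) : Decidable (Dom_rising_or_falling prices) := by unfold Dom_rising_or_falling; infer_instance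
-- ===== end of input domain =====

-- B replaces A's full forward two-counter pass by a backward early-exit scan of
-- the trailing run of same-direction comparisons (objective: faster on typical inputs).

-- ===== PORT A =====
def rising_or_falling (prices : List Int) : Int :=
  let st := (PySem.List.pyRange 0 prices.length 1).foldl
    (fun (st : Int × Int) (i : Int) =>          -- st = (greater_count, less_count)
      let a := PySem.List.pyGetD prices i 0     -- prices[i]   (always in range here)
      let b := PySem.List.pyGetD prices (i-1) 0 -- prices[i-1] (negative index wraps)
      if a = b then st
      else
        let st1 := if a > b then (st.1 + 1, (1 : Int)) else st
        if a < b then ((1 : Int), st1.2 + 1) else st1)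
    ((1 : Int), (1 : Int))
  (PySem.List.max? [st.2, st.1] (fun x => x)).getD 0

-- ===== PORT B =====
-- loop of Source B, scanning indices i, i-1, …, 0; `dir`/`run` are Source B's direction/run
def pvGoB (prices : List Int) : Nat → Int → Int → Int
  | 0, _dir, run =>
      let a := PySem.List.pyGetD prices 0 0
      let b := PySem.List.pyGetD prices ((0:Int) - 1) 0
      if a = b then run + 1
      else
        let d : Int := if a > b then 1 else -1
        if _dir = 0 then 2                       -- run set to 1, loop ends, return 1+1
        else if d = _dir then run + 2
        else run + 1
  | i+1, dir, run =>
      let a := PySem.List.pyGetD prices ((i : Int) + 1) 0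
      let b := PySem.List.pyGetD prices (i : Int) 0
      if a = b then pvGoB prices i dir run
      else
        let d : Int := if a > b then 1 else -1
        if dir = 0 then pvGoB prices i d 1
        else if d = dir then pvGoB prices i dir (run + 1)
        else run + 1                             -- break

def rising_or_falling_alt (prices : List Int) : Int :=
  match prices.length with
  | 0 => 1
  | n+1 => pvGoB prices n 0 0

-- ===== PRECONDITION & SPEC =====
def Spec_rising_or_falling (prices : List Int) (out : Int) : Prop := out = rising_or_falling_alt prices
instance (prices : List Int) (out : Int) : Decidable (Spec_rising_or_falling prices out) := by unfold Spec_rising_or_falling; infer_instance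

-- ===== CLAIM (what is proved, stated in full; the proofs are below) =====
def Claim_equal_rising_or_falling : Prop := ∀ (prices : List Int), Dom_rising_or_falling prices → Spec_rising_or_falling prices (rising_or_falling prices)

-- ===== LEMMAS AND PROOFS =====

/-- sign of the comparison prices[i] vs prices[i-1] : 0 / 1 / -1. -/
def pvSgn (prices : List Int) (i : Int) : Int :=
  let a := PySem.List.pyGetD prices i 0
  let b := PySem.List.pyGetD prices (i-1) 0
  if a = b then 0 else if a > b then 1 else -1

/-- A's loop body as a function of the comparison sign. -/
def pvF (st : Int × Int) (s : Int) : Int × Int :=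
  if s = 0 then st else if s = 1 then (st.1 + 1, 1) else (1, st.2 + 1)

/-- B's loop as a function of the (reversed) comparison-sign list. -/
def pvG : List Int → Int → Int → Int
  | [], _, run => run + 1
  | s :: rest, dir, run =>
    if s = 0 then pvG rest dir run
    else if dir = 0 then pvG rest s 1
    else if s = dir then pvG rest dir (run + 1)
    else run + 1

theorem pvStepA_eq (prices : List Int) (st : Int × Int) (i : Int) :
    (let a := PySem.List.pyGetD prices i 0
     let b := PySem.List.pyGetD prices (i-1) 0
     if a = b then st
     else
       let st1 := if a > b then (st.1 + 1, (1 : Int)) else st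
       if a < b then ((1 : Int), st1.2 + 1) else st1)
    = pvF st (pvSgn prices i) := by
  simp only [pvF, pvSgn]
  rcases lt_trichotomy (PySem.List.pyGetD prices i 0) (PySem.List.pyGetD prices (i-1) 0) with h | h | h
  · simp [h, ne_of_lt h, not_lt.mpr (le_of_lt h)]
  · simp [h]
  · simp [h.ne', not_lt.mpr (le_of_lt h), h]

theorem pvGoB_eq_pvG (prices : List Int) :
    ∀ (i : Nat) (dir run : Int),
      pvGoB prices i dir run
        = pvG (((PySem.List.pyRange 0 ((i : Int) + 1) 1).map (pvSgn prices)).reverse) dir run := by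
  intro i
  induction i with
  | zero =>
    intro dir run
    have h2 : ((PySem.List.pyRange 0 (((0:Nat):Int)+1) 1).map (pvSgn prices)).reverse
        = [pvSgn prices 0] := by
      have h1 : PySem.List.pyRange (0:Int) 1 1 = [0] := by decide
      simp [h1]
    rw [h2]
    simp only [pvGoB, pvG, pvSgn, zero_sub]
    rcases lt_trichotomy (PySem.List.pyGetD prices 0 0) (PySem.List.pyGetD prices (-1 : Int) 0) with h | h | h
    · simp only [h, ne_of_lt h, not_lt.mpr (le_of_lt h), if_false, if_neg (ne_of_lt h)]
      split_ifs <;> (try simp_all [pvG]) <;> omega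
    · simp [h]
    · simp only [h.ne', not_lt.mpr (le_of_lt h), h, if_false, if_neg h.ne']
      split_ifs <;> (try simp_all [pvG]) <;> omega
  | succ i ih =>
    intro dir run
    have hsplit : PySem.List.pyRange 0 (((i+1 : Nat) : Int) + 1) 1
        = PySem.List.pyRange 0 ((i : Int) + 1) 1 ++ [(i : Int) + 1] := by
      have := PySem.List.pyRange_one_succ_right (a := (0:Int)) (b := (i : Int) + 1)
        (by positivity)
      push_cast
      exact this
    have hs : pvSgn prices ((i : Int) + 1)
        = (let a := PySem.List.pyGetD prices ((i : Int) + 1) 0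
           let b := PySem.List.pyGetD prices (i : Int) 0
           if a = b then 0 else if a > b then 1 else -1) := by
      simp only [pvSgn, add_sub_cancel_right]
    simp only [hsplit, List.map_append, List.map_cons, List.map_nil, List.reverse_append,
      List.reverse_cons, List.reverse_nil, List.nil_append, List.cons_append, List.singleton_append]
    simp only [pvGoB, pvG, ← hs]
    rcases lt_trichotomy (PySem.List.pyGetD prices ((i : Int) + 1) 0) (PySem.List.pyGetD prices (i : Int) 0) with h | h | h
    · simp [pvSgn, add_sub_cancel_right, h, ne_of_lt h, not_lt.mpr (le_of_lt h), ih]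
      split_ifs <;> simp_all [ih]
    · simp [pvSgn, add_sub_cancel_right, h, ih]
    · simp [pvSgn, add_sub_cancel_right, h.ne', not_lt.mpr (le_of_lt h), h, ih]
      split_ifs <;> simp_all [ih]

/-- Main invariant: B's backward scan of M computes the counters / the max that
    A's forward fold computes on M.reverse. -/
theorem pvG_cons_zero (M : List Int) (dir run : Int) : pvG (0 :: M) dir run = pvG M dir run := by
  simp [pvG]

theorem pvG_cons_dir0 (M : List Int) (s run : Int) (hs : s ≠ 0) :
    pvG (s :: M) 0 run = pvG M s 1 := by
  simp [pvG, hs]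

theorem pvG_cons_same (M : List Int) (s run : Int) (hs : s ≠ 0) :
    pvG (s :: M) s run = pvG M s (run + 1) := by
  simp [pvG, hs]

theorem pvG_cons_opp (M : List Int) (s dir run : Int) (hs : s ≠ 0) (hd : dir ≠ 0) (hne : s ≠ dir) :
    pvG (s :: M) dir run = run + 1 := by
  simp [pvG, hs, hd, hne]

theorem pvMain (M : List Int) (h : ∀ x ∈ M, x = 0 ∨ x = 1 ∨ x = -1) :
    1 ≤ (M.reverse.foldl pvF ((1:Int),(1:Int))).1 ∧
    1 ≤ (M.reverse.foldl pvF ((1:Int),(1:Int))).2 ∧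
    (∀ r, pvG M 1 r = r + (M.reverse.foldl pvF ((1:Int),(1:Int))).1) ∧
    (∀ r, pvG M (-1) r = r + (M.reverse.foldl pvF ((1:Int),(1:Int))).2) ∧
    pvG M 0 0 = max (M.reverse.foldl pvF ((1:Int),(1:Int))).2 (M.reverse.foldl pvF ((1:Int),(1:Int))).1 := by
  induction M with
  | nil => simp [pvG]
  | cons s M' ih =>
    obtain ⟨hg, hl, hG1, hG2, hG0⟩ := ih (fun x hx => h x (List.mem_cons_of_mem _ hx))
    have hs : s = 0 ∨ s = 1 ∨ s = -1 := h s List.mem_cons_self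
    have hfold : ((s :: M').reverse.foldl pvF ((1:Int),(1:Int)))
        = pvF (M'.reverse.foldl pvF ((1:Int),(1:Int))) s := by
      rw [List.reverse_cons, List.foldl_append]; rfl
    set st := M'.reverse.foldl pvF ((1:Int),(1:Int)) with hst
    rcases hs with rfl | rfl | rfl
    · have hp : pvF st 0 = st := by simp [pvF]
      rw [hfold, hp]
      exact ⟨hg, hl, fun r => by rw [pvG_cons_zero, hG1],
        fun r => by rw [pvG_cons_zero, hG2], by rw [pvG_cons_zero, hG0]⟩
    · have hp : pvF st 1 = (st.1 + 1, 1) := by norm_num [pvF]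
      rw [hfold, hp]
      refine ⟨by dsimp only; omega, by dsimp only; omega, ?_, ?_, ?_⟩
      · intro r
        rw [pvG_cons_same _ _ _ one_ne_zero, hG1]
        dsimp only; omega
      · intro r
        rw [pvG_cons_opp _ _ _ _ one_ne_zero (by norm_num) (by norm_num)]
      · rw [pvG_cons_dir0 _ _ _ one_ne_zero, hG1]
        dsimp only; omega
    · have hp : pvF st (-1) = (1, st.2 + 1) := by norm_num [pvF]
      rw [hfold, hp]
      refine ⟨by dsimp only; omega, by dsimp only; omega, ?_, ?_, ?_⟩
      · intro r
        rw [pvG_cons_opp _ _ _ _ (by norm_num) one_ne_zero (by norm_num)]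
      · intro r
        rw [pvG_cons_same _ _ _ (by norm_num), hG2]
        dsimp only; omega
      · rw [pvG_cons_dir0 _ _ _ (by norm_num), hG2]
        dsimp only; omega

theorem pvSgn_cases (prices : List Int) (i : Int) :
    pvSgn prices i = 0 ∨ pvSgn prices i = 1 ∨ pvSgn prices i = -1 := by
  simp only [pvSgn]
  split_ifs <;> simp

-- ===== VERDICT (by name: the statement is the Claim_ definition above) =====
theorem rising_or_falling_spec : Claim_equal_rising_or_falling := by
  intro prices _
  unfold Spec_rising_or_falling
  cases hn : prices.length with
  | zero =>
    have : prices = [] := List.length_eq_zero_iff.mp hn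
    subst this
    decide
  | succ n =>
    have hc : ((n+1 : Nat) : Int) = (n : Int) + 1 := by push_cast; ring
    unfold rising_or_falling rising_or_falling_alt
    rw [hn, hc]
    show (PySem.List.max? _ _).getD 0 = pvGoB prices n 0 0
    rw [pvGoB_eq_pvG prices n 0 0]
    set L := (PySem.List.pyRange 0 ((n : Int) + 1) 1).map (pvSgn prices) with hL
    have hmem : ∀ x ∈ L.reverse, x = 0 ∨ x = 1 ∨ x = -1 := by
      intro x hx
      rw [List.mem_reverse] at hx
      obtain ⟨i, _, rfl⟩ := List.mem_map.mp hx
      exact pvSgn_cases prices i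
    have hmax := (pvMain L.reverse hmem).2.2.2.2
    rw [List.reverse_reverse] at hmax
    rw [hmax]
    have h1 : (PySem.List.pyRange 0 ((n : Int) + 1) 1).foldl
        (fun (st : Int × Int) (i : Int) =>
          let a := PySem.List.pyGetD prices i 0
          let b := PySem.List.pyGetD prices (i-1) 0
          if a = b then st
          else
            let st1 := if a > b then (st.1 + 1, (1 : Int)) else st
            if a < b then ((1 : Int), st1.2 + 1) else st1)
        ((1 : Int), (1 : Int))
        = L.foldl pvF ((1:Int),(1:Int)) := by
      rw [hL, List.foldl_map]
      exact PySem.List.foldl_congr_mem _ _ _ _ (fun st i _ => pvStepA_eq prices st i)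
    rw [h1, PySem.List.max?_id_cons]
    simp
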